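-- pv_equiv track=rewrite | github.com/format37/avax-pw-crack | docker/distribute_loading.py | id_to_word
-- ===== SOURCE A (Python) =====
-- def id_to_word(alphabet, n):
--     """Convert numeric ID to word using given alphabet"""
--     base = len(alphabet)
--     result = []
--     n += 1  # Adjust for 1-based indexing
--     while n > 0:
--         n -= 1  # Adjust for 0-based indexing
--         result.append(alphabet[n % base])
--         n //= base
--     return ''.join(reversed(result))
-- ===== SOURCE B (Python) =====
-- def id_to_word(alphabet, n):
--     """Convert numeric ID to word using given alphabet"""
--     base = len(alphabet)
--     m = n + 1  # bijective (1-based) numbering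
--     if m <= 0:
--         return ''
--     if base == 1:
--         # unary alphabet: the word is just the single letter repeated m times
--         return alphabet * m
--
--     def helper(k):
--         # high-order digit first: the word comes out in final order, no reverse
--         if k == 0:
--             return ''
--         q, r = divmod(k - 1, base)
--         return helper(q) + alphabet[r]
--
--     return helper(m)
-- ===== Notes on version B (the rewrite author's own statement) =====
-- stated objective: alternative
-- what changed: Replaces A's append-then-reverse-and-join digit loop by a high-order-first recursion on nonnegative quotients that concatenates the word directly in final order (and a closed-form repeat for a one-letter alphabet); Pre_ excludes only the empty alphabet with n >= 0, where both A and B raise ZeroDivisionError.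
import Mathlib
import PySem

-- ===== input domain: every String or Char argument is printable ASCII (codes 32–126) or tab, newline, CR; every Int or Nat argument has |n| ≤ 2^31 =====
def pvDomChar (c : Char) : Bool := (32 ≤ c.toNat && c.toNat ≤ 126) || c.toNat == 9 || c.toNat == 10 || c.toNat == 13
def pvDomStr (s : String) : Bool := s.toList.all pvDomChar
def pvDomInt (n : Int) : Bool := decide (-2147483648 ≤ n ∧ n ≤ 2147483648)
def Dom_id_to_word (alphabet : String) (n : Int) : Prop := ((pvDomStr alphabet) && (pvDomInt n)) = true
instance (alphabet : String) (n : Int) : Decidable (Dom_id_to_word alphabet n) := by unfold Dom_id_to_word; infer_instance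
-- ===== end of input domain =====

-- B replaces A's append/reverse/join digit loop by a high-order-first recursion over
-- nonnegative quotients that concatenates the word directly in final order (closed-form
-- repeat for a one-letter alphabet); same return value on Pre_.

-- ===== PORT A =====
-- while n > 0: n -= 1; result.append(alphabet[n % base]); n //= base   (fuel = enough iterations)
def idLoopA (alphabet : List Char) (base : Int) : Nat → Int → List Char → List Char
  | 0, _, acc => acc
  | fuel+1, n, acc =>
    if n > 0 then
      match PySem.Int.divmod? (n - 1) base with
      | none => acc            -- base = 0: Python raises ZeroDivisionError here (outside Pre_)
      | some (q, r) =>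
        match PySem.List.pyGet? alphabet r with
        | none => acc          -- unreachable: 0 ≤ r < base = length
        | some c => idLoopA alphabet base fuel q (acc ++ [c])
    else acc

def id_to_word (alphabet : String) (n : Int) : String :=
  let base : Int := (alphabet.toList.length : Int)
  String.ofList (List.reverse (idLoopA alphabet.toList base (n + 1).toNat (n + 1) []))

-- ===== PORT B =====
-- helper(k): '' when k == 0, else helper(q).push alphabet[r] with (q, r) = divmod(k-1, base).
-- All values in B's recursion are nonnegative, so Nat division/modulo is exact for Python's
-- divmod there, and r = (k-1) % base < base = |alphabet| on Pre_, so List.getD is exact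
-- for alphabet[r] (the default is never used).
def idHelperB (alphabet : List Char) (base : Nat) : Nat → Nat → String
  | 0, _ => ""
  | _+1, 0 => ""
  | fuel+1, k+1 => (idHelperB alphabet base fuel (k / base)).push (alphabet.getD (k % base) 'a')

def id_to_word_alt (alphabet : String) (n : Int) : String :=
  let base : Nat := alphabet.toList.length
  let m : Int := n + 1
  if m ≤ 0 then ""
  else if base = 1 then String.ofList (List.replicate m.toNat alphabet.toList).flatten  -- alphabet * m
  else idHelperB alphabet.toList base m.toNat m.toNat

-- ===== PRECONDITION & SPEC =====
-- Pre_ excludes only the inputs where Python A raises ZeroDivisionError: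
-- empty alphabet together with n ≥ 0 (the loop body divides by base = 0).
def Pre_id_to_word (alphabet : String) (n : Int) : Prop := alphabet.toList ≠ [] ∨ n < 0
instance (alphabet : String) (n : Int) : Decidable (Pre_id_to_word alphabet n) := by
  unfold Pre_id_to_word; infer_instance
def pvWitness_id_to_word : String × Int := ("abc", 7)

def Spec_id_to_word (alphabet : String) (n : Int) (out : String) : Prop := out = id_to_word_alt alphabet n
instance (alphabet : String) (n : Int) (out : String) : Decidable (Spec_id_to_word alphabet n out) := by unfold Spec_id_to_word; infer_instance

-- ===== CLAIM (what is proved, stated in full; the proofs are below) =====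
def Claim_equal_id_to_word : Prop := ∀ (alphabet : String) (n : Int), Dom_id_to_word alphabet n → Pre_id_to_word alphabet n → Spec_id_to_word alphabet n (id_to_word alphabet n)

-- ===== LEMMAS AND PROOFS =====

-- A's loop on a nonnegative counter equals B's recursion with the same fuel,
-- up to the reverse/accumulator bookkeeping.
theorem idLoopA_eq_helper (alphabet : List Char) (base : Nat) (hb : 1 ≤ base)
    (hlen : alphabet.length = base) :
    ∀ (fuel k : Nat) (acc : List Char),
      idLoopA alphabet (base : Int) fuel (k : Int) acc
        = acc ++ (idHelperB alphabet base fuel k).toList.reverse := by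
  intro fuel
  induction fuel with
  | zero => intro k acc; simp [idLoopA, idHelperB]
  | succ fuel ih =>
    intro k acc
    cases k with
    | zero => simp [idLoopA, idHelperB]
    | succ k' =>
      have hk : ((k' + 1 : Nat) : Int) > 0 := by positivity
      have hdm : PySem.Int.divmod? (((k' + 1 : Nat) : Int) - 1) (base : Int)
          = some (((k' / base : Nat) : Int), ((k' % base : Nat) : Int)) := by
        have h1 : (((k' + 1 : Nat) : Int) - 1) = ((k' : Nat) : Int) := by push_cast; ring
        rw [h1]
        have hbz : ((base : Int)) ≠ 0 := by exact_mod_cast Nat.one_le_iff_ne_zero.mp hb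
        simp only [PySem.Int.divmod?, hbz, if_false]
        rw [Int.fdiv_eq_ediv_of_nonneg _ (by positivity), Int.fmod_eq_emod_of_nonneg _ (by positivity)]
        rw [← Int.natCast_div, ← Int.natCast_emod]
      have hr : k' % base < alphabet.length := by
        rw [hlen]; exact Nat.mod_lt _ (by omega)
      have hg : PySem.List.pyGet? alphabet (((k' % base : Nat) : Int))
          = some (alphabet.getD (k' % base) 'a') := by
        rw [PySem.List.pyGet?_natCast, List.getElem?_eq_getElem hr, List.getD_eq_getElem _ _ hr]
      simp only [idLoopA, idHelperB, hk, if_true, hdm, hg]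
      rw [ih (k' / base) (acc ++ [alphabet.getD (k' % base) 'a'])]
      simp [String.toList_push]

-- In base 1, A's loop appends the single letter min fuel n.toNat times.
theorem idLoopA_base_one (c : Char) :
    ∀ (fuel : Nat) (n : Int) (acc : List Char),
      idLoopA [c] 1 fuel n acc = acc ++ List.replicate (min fuel n.toNat) c := by
  intro fuel
  induction fuel with
  | zero => intro n acc; simp [idLoopA]
  | succ fuel ih =>
    intro n acc
    simp only [idLoopA]
    by_cases hn : n > 0
    · have hdm : PySem.Int.divmod? (n - 1) 1 = some (n - 1, 0) := by
        simp [PySem.Int.divmod?]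
      have hg : PySem.List.pyGet? [c] (0 : Int) = some c := by
        simp [PySem.List.pyGet?, PySem.List.pyIdx?]
      simp only [hn, if_true, hdm, hg]
      rw [ih (n - 1) (acc ++ [c])]
      have hmin : min (fuel + 1) n.toNat = min fuel (n - 1).toNat + 1 := by omega
      rw [hmin, List.replicate_succ, List.append_assoc]
      simp
    · have h0 : n.toNat = 0 := by omega
      simp [hn, h0]

theorem id_to_word_spec' (alphabet : String) (n : Int) (h : Pre_id_to_word alphabet n) :
    id_to_word alphabet n = id_to_word_alt alphabet n := by
  unfold id_to_word id_to_word_alt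
  by_cases hm : n + 1 ≤ 0
  · have : (n + 1).toNat = 0 := by omega
    simp [this, hm, idLoopA]
  · simp only [hm, if_false]
    have hal : alphabet.toList ≠ [] := by
      rcases h with h | h
      · exact h
      · omega
    have hb : 1 ≤ alphabet.toList.length := List.length_pos_iff.mpr hal
    by_cases h1 : alphabet.toList.length = 1
    · -- base = 1: the alphabet is a single character
      obtain ⟨c, hc⟩ : ∃ c, alphabet.toList = [c] := by
        cases hl : alphabet.toList with
        | nil => simp [hl] at h1
        | cons a t =>
          cases t with
          | nil => exact ⟨a, rfl⟩
          | cons b t' => simp [hl] at h1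
      rw [hc]
      have hbi : ((([c] : List Char).length : Int)) = 1 := by simp
      rw [if_pos (show ([c] : List Char).length = 1 from rfl),
        show ((([c] : List Char).length : Int)) = 1 from rfl,
        idLoopA_base_one c ((n+1).toNat) (n+1) []]
      have hmin : min (n + 1).toNat (n + 1).toNat = (n + 1).toNat := by omega
      rw [hmin]
      simp [List.reverse_replicate]
    · simp only [h1, if_false]
      have hcast : (n + 1) = (((n + 1).toNat : Nat) : Int) := by omega
      rw [hcast]
      simp only [Int.toNat_natCast]
      rw [idLoopA_eq_helper alphabet.toList alphabet.toList.length hb rfl]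
      simp

-- ===== VERDICT (by name: the statement is the Claim_ definition above) =====
theorem id_to_word_spec : Claim_equal_id_to_word := by
  intro alphabet n _ hpre
  unfold Spec_id_to_word
  exact id_to_word_spec' alphabet n hpre
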